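-- pv_equiv track=rewrite | github.com/micheloosterhof/aldegonde | lp.py | decrypt_additive_pt_autokey
-- ===== SOURCE A (Python) =====
-- N = 29  # GF(29)
--
-- def decrypt_additive_pt_autokey(C: list[int], primer_p: int) -> list[int]:
--     """C(i) = P(i) + P(i-1)  =>  P(i) = C(i) - P(i-1)"""
--     P = []
--     prev_p = primer_p
--     for c in C:
--         p = (c - prev_p) % N
--         P.append(p)
--         prev_p = p
--     return P
-- ===== SOURCE B (Python) =====
-- N = 29  # GF(29)
--
-- def decrypt_additive_pt_autokey(C: list[int], primer_p: int) -> list[int]: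
--     """Staged closed form: alternate the ciphertext signs, take plain prefix
--     sums T(i), then P(i) = +-(T(i) - primer) mod N depending on the parity of i;
--     no feedback of previous plaintext outputs."""
--     signed = [c if i % 2 == 0 else -c for i, c in enumerate(C)]
--     T = []
--     s = 0
--     for x in signed:
--         s += x
--         T.append(s)
--     return [(t - primer_p) % N if i % 2 == 0 else (primer_p - t) % N
--             for i, t in enumerate(T)]
-- ===== Notes on version B (the rewrite author's own statement) =====
-- stated objective: alternative
-- what changed: Replaces A's single feedback loop P(i)=C(i)-P(i-1) (previous reduced output fed back) with three independent stages: sign-alternate the ciphertext, take its prefix sums T(i), then map the closed form P(i)=+-(T(i)-primer) mod 29 by index parity.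
import Mathlib
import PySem

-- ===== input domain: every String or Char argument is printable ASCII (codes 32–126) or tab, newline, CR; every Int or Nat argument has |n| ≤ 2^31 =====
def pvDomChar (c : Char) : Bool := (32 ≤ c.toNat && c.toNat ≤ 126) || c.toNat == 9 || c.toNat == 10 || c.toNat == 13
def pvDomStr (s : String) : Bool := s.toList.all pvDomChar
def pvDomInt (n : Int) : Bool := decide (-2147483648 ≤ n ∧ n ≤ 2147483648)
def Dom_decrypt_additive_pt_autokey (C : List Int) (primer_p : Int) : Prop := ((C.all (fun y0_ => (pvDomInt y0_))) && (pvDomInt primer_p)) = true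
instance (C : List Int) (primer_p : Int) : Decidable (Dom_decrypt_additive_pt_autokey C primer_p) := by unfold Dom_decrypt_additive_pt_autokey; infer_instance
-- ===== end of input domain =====

-- B replaces A's feedback loop (previous plaintext fed into the next step) by three
-- independent stages: sign-alternated ciphertext, prefix sums, closed-form map by
-- index parity; same cost, different decomposition (objective: alternative).

-- ===== PORT A =====
-- the for-loop of A, state = prev_p
def pvALoop : List Int → Int → List Int
  | [], _ => []
  | c :: cs, prev_p =>
    let p := PySem.Int.mod (c - prev_p) 29
    p :: pvALoop cs p

def decrypt_additive_pt_autokey (C : List Int) (primer_p : Int) : List Int :=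
  pvALoop C primer_p

-- ===== PORT B =====
-- stage 2 of B: the prefix-sum for-loop, state = s
def pvPrefixSums : List Int → Int → List Int
  | [], _ => []
  | x :: xs, s => (s + x) :: pvPrefixSums xs (s + x)

def decrypt_additive_pt_autokey_alt (C : List Int) (primer_p : Int) : List Int :=
  let signed := (PySem.List.enumerate C).map
    (fun ic => if PySem.Int.mod ic.1 2 = 0 then ic.2 else -ic.2)
  let T := pvPrefixSums signed 0
  (PySem.List.enumerate T).map
    (fun it => if PySem.Int.mod it.1 2 = 0 then PySem.Int.mod (it.2 - primer_p) 29
               else PySem.Int.mod (primer_p - it.2) 29)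

-- ===== PRECONDITION & SPEC =====
def Spec_decrypt_additive_pt_autokey (C : List Int) (primer_p : Int) (out : List Int) : Prop := out = decrypt_additive_pt_autokey_alt C primer_p
instance (C : List Int) (primer_p : Int) (out : List Int) : Decidable (Spec_decrypt_additive_pt_autokey C primer_p out) := by unfold Spec_decrypt_additive_pt_autokey; infer_instance

-- ===== CLAIM (what is proved, stated in full; the proofs are below) =====
def Claim_equal_decrypt_additive_pt_autokey : Prop := ∀ (C : List Int) (primer_p : Int), Dom_decrypt_additive_pt_autokey C primer_p → Spec_decrypt_additive_pt_autokey C primer_p (decrypt_additive_pt_autokey C primer_p)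

-- ===== LEMMAS AND PROOFS =====

theorem pv_mod_pos (a n : Int) (h : 0 < n) : PySem.Int.mod a n = a % n :=
  PySem.Int.mod_eq_emod_of_pos h

-- Invariant: A's previous plaintext is congruent mod 29 to ±(acc - primer)
-- according to the parity of the current index k.
theorem pv_stage_eq : ∀ (cs : List Int) (primer_p k acc prev_p : Int),
    prev_p % 29 = ((if k % 2 = 0 then (-1 : Int) else 1) * (acc - primer_p)) % 29 →
    (PySem.List.enumerate (pvPrefixSums ((PySem.List.enumerate cs k).map
        (fun ic => if PySem.Int.mod ic.1 2 = 0 then ic.2 else -ic.2)) acc) k).map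
      (fun it => if PySem.Int.mod it.1 2 = 0 then PySem.Int.mod (it.2 - primer_p) 29
                 else PySem.Int.mod (primer_p - it.2) 29)
      = pvALoop cs prev_p := by
  intro cs
  induction cs with
  | nil => intros; rfl
  | cons c cs ih =>
    intro primer_p k acc prev_p hp
    simp only [PySem.List.enumerate_cons, List.map_cons, pvPrefixSums, pvALoop]
    rw [pv_mod_pos k 2 (by norm_num)] at *
    by_cases hk : k % 2 = 0
    · simp only [if_pos hk] at hp ⊢
      simp only [List.cons.injEq]
      refine ⟨?_, ?_⟩
      · rw [pv_mod_pos, pv_mod_pos] <;> try norm_num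
        omega
      · apply ih primer_p (k + 1) (acc + c)
        rw [pv_mod_pos _ 29 (by norm_num)]
        have h1 : (k + 1) % 2 ≠ 0 := by omega
        simp only [if_neg h1]
        omega
    · simp only [if_neg hk] at hp ⊢
      simp only [List.cons.injEq]
      refine ⟨?_, ?_⟩
      · rw [pv_mod_pos, pv_mod_pos] <;> try norm_num
        omega
      · apply ih primer_p (k + 1) (acc + -c)
        rw [pv_mod_pos _ 29 (by norm_num)]
        have h1 : (k + 1) % 2 = 0 := by omega
        simp only [if_pos h1]
        omega

-- ===== VERDICT (by name: the statement is the Claim_ definition above) =====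
theorem decrypt_additive_pt_autokey_spec : Claim_equal_decrypt_additive_pt_autokey := by
  intro C primer_p _
  unfold Spec_decrypt_additive_pt_autokey decrypt_additive_pt_autokey decrypt_additive_pt_autokey_alt
  exact (pv_stage_eq C primer_p 0 0 primer_p (by norm_num)).symm
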